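-- pv_equiv track=rewrite | github.com/unknownusername504/RDNA3EMU | rdna3emu/isa/utils.py | bitreplicate
-- ===== SOURCE A (Python) =====
-- def bitset0(x, offset):
--     return x & (~(1 << offset))
--
-- def bitset1(x, offset):
--     return x | (1 << offset)
--
-- def bitreplicate(x):
--     tmp = x
--     r = 0
--     for i in range(0, 32):
--         if tmp & 1:
--             r = bitset1(r, i * 2)
--             r = bitset1(r, i * 2 + 1)
--         else:
--             r = bitset0(r, i * 2)
--             r = bitset0(r, i * 2 + 1)
--         tmp >>= 1
--     return r
-- ===== SOURCE B (Python) =====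
-- # Table-driven: duplicate each of the 8 nibbles' bits via a precomputed 16-entry table.
-- _DUP = [0, 3, 12, 15, 48, 51, 60, 63, 192, 195, 204, 207, 240, 243, 252, 255]
--
-- def bitreplicate(x):
--     return sum(_DUP[(x >> (4 * j)) & 0xF] << (8 * j) for j in range(8))
-- ===== Notes on version B (the rewrite author's own statement) =====
-- stated objective: alternative
-- what changed: Replaces the 32-iteration per-bit loop with per-bit bitset helper calls by a table-driven pass: 8 nibble lookups in a precomputed 16-entry bit-duplication table, shifted and summed.
import Mathlib
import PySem

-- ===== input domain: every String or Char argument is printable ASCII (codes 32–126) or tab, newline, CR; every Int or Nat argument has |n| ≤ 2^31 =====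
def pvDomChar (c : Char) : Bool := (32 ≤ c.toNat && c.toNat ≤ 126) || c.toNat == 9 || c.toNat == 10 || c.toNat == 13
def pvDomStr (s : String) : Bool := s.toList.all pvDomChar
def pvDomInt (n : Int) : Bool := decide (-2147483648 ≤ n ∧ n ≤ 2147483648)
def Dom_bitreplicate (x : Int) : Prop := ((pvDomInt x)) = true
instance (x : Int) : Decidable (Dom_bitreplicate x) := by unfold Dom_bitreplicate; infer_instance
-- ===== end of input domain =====

-- B replaces A's per-bit loop (two bitset helper calls per bit) by a table-driven pass:
-- one lookup per nibble in a precomputed bit-duplication table, shifted and summed.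


-- ===== PORT A =====
-- the offsets fed to bitset0/bitset1 are always nonnegative literals, so
-- Python's '1 << offset' is exactly '1 <<< offset.toNat'
def bitset0 (x offset : Int) : Int := PySem.Int.band x (Int.not ((1 : Int) <<< offset.toNat))

def bitset1 (x offset : Int) : Int := PySem.Int.bor x ((1 : Int) <<< offset.toNat)

-- loop body of A on the state (tmp, r); 'if tmp & 1:' is Python truthiness, i.e. tmp & 1 ≠ 0
def bitreplicateStep (s : Int × Int) (i : Int) : Int × Int :=
  let r := if PySem.Int.band s.1 1 ≠ 0
           then bitset1 (bitset1 s.2 (i * 2)) (i * 2 + 1)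
           else bitset0 (bitset0 s.2 (i * 2)) (i * 2 + 1)
  (s.1 >>> (1 : Nat), r)

def bitreplicate (x : Int) : Int :=
  ((PySem.List.pyRange 0 32 1).foldl bitreplicateStep (x, 0)).2

-- ===== PORT B =====
def dupTable : List Int := [0, 3, 12, 15, 48, 51, 60, 63, 192, 195, 204, 207, 240, 243, 252, 255]

-- '(x >> (4*j)) & 0xF' always lies in [0, 16), so the list lookup never raises and '.getD 0' is never used
def bitreplicate_alt (x : Int) : Int :=
  ((PySem.List.pyRange 0 8 1).map (fun (j : Int) =>
    ((PySem.List.pyGet? dupTable (PySem.Int.band (x >>> (4 * j).toNat) 15)).getD 0) <<< (8 * j).toNat)).sum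

-- ===== PRECONDITION & SPEC =====
def Spec_bitreplicate (x : Int) (out : Int) : Prop := out = bitreplicate_alt x
instance (x : Int) (out : Int) : Decidable (Spec_bitreplicate x out) := by unfold Spec_bitreplicate; infer_instance

-- ===== CLAIM (what is proved, stated in full; the proofs are below) =====
def Claim_equal_bitreplicate : Prop := ∀ (x : Int), Dom_bitreplicate x → Spec_bitreplicate x (bitreplicate x)

-- ===== LEMMAS AND PROOFS =====

-- common specification: duplicate each of the low n bits of t, written arithmetically
def repl : Nat → Int → Int
  | 0, _ => 0
  | n + 1, t => (if t % 2 = 1 then 3 else 0) + 4 * repl n (t / 2)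

lemma nat_and15 (a : Nat) : a &&& 15 = a % 16 := by
  have h := Nat.and_two_pow_sub_one_eq_mod a 4
  norm_num at h
  exact h

lemma band_fifteen (t : Int) : PySem.Int.band t 15 = t % 16 := by
  rcases le_or_gt 0 t with ht | ht
  · rw [PySem.Int.band_of_nonneg ht (by norm_num)]
    rw [show (15 : Int).toNat = 15 from rfl, nat_and15]
    omega
  · have hdef : PySem.Int.band t 15 = ((15 : Int).toNat - ((15 : Int).toNat &&& (-t - 1).toNat) : Nat) := by
      simp [PySem.Int.band, show ¬ (0 ≤ t) by omega]
    rw [hdef, show (15 : Int).toNat = 15 from rfl, Nat.land_comm, nat_and15]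
    omega

lemma int_not_eq (a : Int) : Int.not a = -a - 1 := by
  cases a with
  | ofNat n => simp [Int.not]; omega
  | negSucc n => simp [Int.not]

lemma bor_two_pow (r : Int) (p : Nat) (hr : 0 ≤ r) (hlt : r < 2 ^ p) :
    PySem.Int.bor r ((1 : Int) <<< p) = r + 2 ^ p := by
  have h1 : ((1 : Int) <<< p) = 2 ^ p := by rw [Int.shiftLeft_eq]; ring
  have htn : ((2 : Int) ^ p) = ((2 ^ p : Nat) : Int) := by push_cast; ring
  rw [h1, PySem.Int.bor_of_nonneg hr (by positivity), htn, Int.toNat_natCast]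
  have hlt' : r.toNat < 2 ^ p := by omega
  have key : r.toNat ||| 2 ^ p = r.toNat + 2 ^ p := by
    rw [Nat.add_comm]
    apply Nat.eq_of_testBit_eq
    intro i
    rcases lt_trichotomy i p with hi | rfl | hi
    · simp [Nat.testBit_two_pow_of_ne (by omega : p ≠ i), Nat.testBit_two_pow_add_gt hi]
    · simp [Nat.testBit_two_pow_add_eq, Nat.testBit_lt_two_pow hlt']
    · have hb : 2 ^ p + r.toNat < 2 ^ i := by
        calc 2 ^ p + r.toNat < 2 ^ p + 2 ^ p := by omega
        _ = 2 ^ (p + 1) := by ring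
        _ ≤ 2 ^ i := Nat.pow_le_pow_right (by norm_num) (by omega)
      simp [Nat.testBit_lt_two_pow hb,
        Nat.testBit_lt_two_pow (show r.toNat < 2 ^ i by calc r.toNat < 2 ^ p := hlt'
          _ ≤ 2 ^ i := Nat.pow_le_pow_right (by norm_num) (by omega)),
        Nat.testBit_two_pow_of_ne (by omega : p ≠ i)]
  rw [key]
  push_cast [Int.toNat_of_nonneg hr]
  norm_num

lemma band_not_two_pow (r : Int) (p : Nat) (hr : 0 ≤ r) (hlt : r < 2 ^ p) :
    PySem.Int.band r (Int.not ((1 : Int) <<< p)) = r := by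
  have h1 : ((1 : Int) <<< p) = 2 ^ p := by rw [Int.shiftLeft_eq]; ring
  have htn : ((2 : Int) ^ p) = ((2 ^ p : Nat) : Int) := by push_cast; ring
  have h2 : Int.not ((1 : Int) <<< p) = -(2 ^ p) - 1 := by
    rw [h1, int_not_eq]
  have hneg : ¬ (0 ≤ Int.not ((1 : Int) <<< p)) := by
    rw [h2]; have : (0 : Int) < 2 ^ p := by positivity
    omega
  have hm : (-(Int.not ((1 : Int) <<< p)) - 1).toNat = 2 ^ p := by
    rw [h2, show (-(-(2 ^ p : Int) - 1) - 1) = 2 ^ p by ring, htn, Int.toNat_natCast]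
  simp only [PySem.Int.band, if_pos hr, if_neg hneg, hm]
  have hb : r.toNat &&& 2 ^ p = 0 := by
    rw [Nat.and_two_pow, Nat.testBit_lt_two_pow (show r.toNat < 2 ^ p by omega)]
    simp
  rw [hb]
  simp [Int.toNat_of_nonneg hr]

lemma band_one_emod (t : Int) : PySem.Int.band t 1 = t % 2 := by
  rw [PySem.Int.band_one, PySem.Int.mod_eq_emod_of_pos (by norm_num)]

lemma nib (t : Int) : ((PySem.List.pyGet? dupTable (PySem.Int.band t 15)).getD 0) = repl 4 t := by
  rw [band_fifteen]
  have hcases : t % 16 = 0 ∨ t % 16 = 1 ∨ t % 16 = 2 ∨ t % 16 = 3 ∨ t % 16 = 4 ∨ t % 16 = 5 ∨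
      t % 16 = 6 ∨ t % 16 = 7 ∨ t % 16 = 8 ∨ t % 16 = 9 ∨ t % 16 = 10 ∨ t % 16 = 11 ∨
      t % 16 = 12 ∨ t % 16 = 13 ∨ t % 16 = 14 ∨ t % 16 = 15 := by omega
  simp only [repl]
  rcases hcases with h | h | h | h | h | h | h | h | h | h | h | h | h | h | h | h <;>
    rw [h] <;>
    norm_num [dupTable, PySem.List.pyGet?, PySem.List.pyIdx?,
      show Int.toNat 0 = 0 from rfl, show Int.toNat 1 = 1 from rfl, show Int.toNat 2 = 2 from rfl,
      show Int.toNat 3 = 3 from rfl, show Int.toNat 4 = 4 from rfl, show Int.toNat 5 = 5 from rfl,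
      show Int.toNat 6 = 6 from rfl, show Int.toNat 7 = 7 from rfl, show Int.toNat 8 = 8 from rfl,
      show Int.toNat 9 = 9 from rfl, show Int.toNat 10 = 10 from rfl, show Int.toNat 11 = 11 from rfl,
      show Int.toNat 12 = 12 from rfl, show Int.toNat 13 = 13 from rfl, show Int.toNat 14 = 14 from rfl,
      show Int.toNat 15 = 15 from rfl] <;>
    split_ifs <;>
    omega

lemma shiftRight_one (t : Int) : t >>> (1 : Nat) = t / 2 := by
  rw [Int.shiftRight_eq_div_pow]; norm_num

lemma stepA_eq (i : Nat) (t r : Int) (hr : 0 ≤ r) (hlt : r < 2 ^ (2 * i)) :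
    bitreplicateStep (t, r) (i : Int) =
      (t / 2, r + 2 ^ (2 * i) * (if t % 2 = 1 then 3 else 0)) := by
  have ht1 : ((i : Int) * 2).toNat = 2 * i := by omega
  have ht2 : ((i : Int) * 2 + 1).toNat = 2 * i + 1 := by omega
  have hlt2 : r < 2 ^ (2 * i + 1) := lt_of_lt_of_le hlt (by rw [pow_succ]; omega)
  simp only [bitreplicateStep, shiftRight_one, band_one_emod]
  rcases Int.emod_two_eq_zero_or_one t with h2 | h2 <;> rw [h2]
  · norm_num
    unfold bitset0
    rw [ht1, band_not_two_pow r (2 * i) hr hlt, ht2, band_not_two_pow r (2 * i + 1) hr hlt2]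
  · norm_num
    unfold bitset1
    rw [ht1, bor_two_pow r (2 * i) hr hlt, ht2,
      bor_two_pow (r + 2 ^ (2 * i)) (2 * i + 1) (by omega) (by rw [pow_succ]; omega)]
    rw [pow_succ]
    ring

lemma loopA (n : Nat) : ∀ (i : Nat) (t r : Int), 0 ≤ r → r < 2 ^ (2 * i) →
    ((PySem.List.pyRange (i : Int) ((i : Int) + (n : Int)) 1).foldl bitreplicateStep (t, r)).2
      = r + 2 ^ (2 * i) * repl n t := by
  induction n with
  | zero =>
    intro i t r _ _
    simp [PySem.List.pyRange, repl]
  | succ n ih =>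
    intro i t r hr hlt
    have hpos : (0 : Int) < 2 ^ (2 * i) := by positivity
    rw [show ((i : Int) + ((n + 1 : Nat) : Int)) = (i : Int) + ((n : Int) + 1) by push_cast; ring]
    rw [PySem.List.pyRange_one_cons (by omega : (i : Int) < (i : Int) + ((n : Int) + 1))]
    rw [List.foldl_cons, stepA_eq i t r hr hlt]
    have hp : (2 : Int) ^ (2 * (i + 1)) = 2 ^ (2 * i) * 4 := by
      rw [show 2 * (i + 1) = 2 * i + 2 by ring, pow_add]; ring
    have hrange : PySem.List.pyRange ((i : Int) + 1) ((i : Int) + ((n : Int) + 1)) 1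
        = PySem.List.pyRange (((i + 1 : Nat) : Int)) (((i + 1 : Nat) : Int) + (n : Int)) 1 := by
      congr 1 <;> push_cast <;> ring
    rw [hrange, ih (i + 1) (t / 2) _ (by split_ifs <;> omega) (by rw [hp]; split_ifs <;> omega)]
    rw [hp]
    simp only [repl]
    ring

lemma portA_eq (x : Int) : bitreplicate x = repl 32 x := by
  unfold bitreplicate
  have h := loopA 32 0 x 0 le_rfl (by norm_num)
  norm_num at h
  exact h

lemma repl_add (m n : Nat) (t : Int) :
    repl (m + n) t = repl m t + 4 ^ m * repl n (t / 2 ^ m) := by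
  induction m generalizing t with
  | zero => simp [repl]
  | succ m ih =>
    rw [show m + 1 + n = (m + n) + 1 by ring]
    simp only [repl]
    rw [ih (t / 2)]
    rw [show t / 2 / 2 ^ m = t / 2 ^ (m + 1) by
      rw [Int.ediv_ediv_of_nonneg (by positivity), pow_succ']]
    ring

lemma portB_eq (x : Int) : bitreplicate_alt x = repl 32 x := by
  unfold bitreplicate_alt
  rw [show PySem.List.pyRange 0 8 1 = [0, 1, 2, 3, 4, 5, 6, 7] from by decide]
  simp only [List.map_cons, List.map_nil, List.sum_cons, List.sum_nil, nib,
    show ((4:Int)*0).toNat = 0 from rfl, show ((4:Int)*1).toNat = 4 from rfl, show ((4:Int)*2).toNat = 8 from rfl, show ((4:Int)*3).toNat = 12 from rfl, show ((4:Int)*4).toNat = 16 from rfl, show ((4:Int)*5).toNat = 20 from rfl, show ((4:Int)*6).toNat = 24 from rfl, show ((4:Int)*7).toNat = 28 from rfl,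
    show ((8:Int)*0).toNat = 0 from rfl, show ((8:Int)*1).toNat = 8 from rfl, show ((8:Int)*2).toNat = 16 from rfl, show ((8:Int)*3).toNat = 24 from rfl, show ((8:Int)*4).toNat = 32 from rfl, show ((8:Int)*5).toNat = 40 from rfl, show ((8:Int)*6).toNat = 48 from rfl, show ((8:Int)*7).toNat = 56 from rfl,
    Int.shiftRight_eq_div_pow, Int.shiftLeft_eq]
  norm_num
  rw [show (32 : Nat) = 4 + (4 + (4 + (4 + (4 + (4 + (4 + 4)))))) from by norm_num]
  rw [repl_add 4, repl_add 4, repl_add 4, repl_add 4, repl_add 4, repl_add 4, repl_add 4]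
  norm_num
  rw [show x / 16 / 16 = x / 256 from by omega,
    show x / 256 / 16 = x / 4096 from by omega,
    show x / 4096 / 16 = x / 65536 from by omega,
    show x / 65536 / 16 = x / 1048576 from by omega,
    show x / 1048576 / 16 = x / 16777216 from by omega,
    show x / 16777216 / 16 = x / 268435456 from by omega]
  ring

-- ===== VERDICT (by name: the statement is the Claim_ definition above) =====
theorem bitreplicate_spec : Claim_equal_bitreplicate := by
  intro x _
  unfold Spec_bitreplicate
  rw [portA_eq, portB_eq]
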